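-- pv_equiv track=rewrite | github.com/Shreyasvprasad/DSA | rastaandkeshtak.py | largest_common_subsquare
-- ===== SOURCE A (Python) =====
-- def largest_common_subsquare(A, B):
--     n, m = len(A), len(A[0])
--     x, y = len(B), len(B[0])
--     dp = [[0] * (y + 1) for _ in range(x + 1)]
--     max_len = 0
--
--     for i in range(1, n + 1):
--         for j in range(1, m + 1):
--             for k in range(1, x + 1):
--                 for l in range(1, y + 1):
--                     if A[i - 1][j - 1] == B[k - 1][l - 1]:
--                         dp[k][l] = dp[k - 1][l - 1] + 1
--                         max_len = max(max_len, dp[k][l])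
--
--     return max_len
-- ===== SOURCE B (Python) =====
-- def largest_common_subsquare(A, B):
--     x, y = len(B), len(B[0])
--     # index: value -> list of its 1-based (k, l) positions in B, in row-major order
--     index = {}
--     for k in range(1, x + 1):
--         for l in range(1, y + 1):
--             index.setdefault(B[k - 1][l - 1], []).append((k, l))
--     dp = [[0] * (y + 1) for _ in range(x + 1)]
--     max_len = 0
--     for i in range(1, len(A) + 1):
--         for j in range(1, len(A[0]) + 1):
--             for (k, l) in index.get(A[i - 1][j - 1], []):
--                 dp[k][l] = dp[k - 1][l - 1] + 1
--                 max_len = max(max_len, dp[k][l])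
--     return max_len
-- ===== Notes on version B (the rewrite author's own statement) =====
-- stated objective: alternative
-- what changed: B precomputes a dict from each value in B to its row-major (k,l) positions, so each A-cell iterates only over its matching B cells instead of rescanning all of B with two inner loops; measured only ~1.4x on a timing run's match-heavy inputs, so no speed claim.
-- outside the precondition, e.g. on largest_common_subsquare([[]], [[1, 2], [3]]): A returns 0, B raises IndexError; on largest_common_subsquare([[1], []], [[]]): A returns 0, B raises IndexError
import Mathlib
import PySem

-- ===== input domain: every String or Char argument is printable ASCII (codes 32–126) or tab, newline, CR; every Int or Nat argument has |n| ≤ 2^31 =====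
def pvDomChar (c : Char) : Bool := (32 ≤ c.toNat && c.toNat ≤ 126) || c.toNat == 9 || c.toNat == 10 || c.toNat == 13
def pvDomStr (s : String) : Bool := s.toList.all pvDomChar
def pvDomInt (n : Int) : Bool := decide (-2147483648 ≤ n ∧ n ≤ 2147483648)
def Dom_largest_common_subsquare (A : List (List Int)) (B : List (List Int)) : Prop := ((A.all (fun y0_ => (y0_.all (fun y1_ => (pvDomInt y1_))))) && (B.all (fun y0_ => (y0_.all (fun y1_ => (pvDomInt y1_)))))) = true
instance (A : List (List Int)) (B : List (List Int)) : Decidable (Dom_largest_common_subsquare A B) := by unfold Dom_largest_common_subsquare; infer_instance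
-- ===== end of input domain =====

-- B replaces A's two inner loops that scan all of B for every A-cell by a dict index
-- from value to its (k,l) positions, visiting only matching cells in the same row-major order.

-- ===== PORT A =====
-- shared cell access/update helpers (the same Python lines occur verbatim in A and B):
-- dp[k][l] read (indices are always ≥ 0 here, pyGetD is exact in range; out-of-range reads
-- only happen outside Pre_, where the Python raises)
def pvGet2 (dp : List (List Int)) (k l : Int) : Int :=
  PySem.List.pyGetD (PySem.List.pyGetD dp k []) l 0
-- dp[k][l] = v  (k,l ≥ 1 always when used)
def pvSet2 (dp : List (List Int)) (k l : Int) (v : Int) : List (List Int) :=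
  PySem.List.pySetD dp k (PySem.List.pySetD (PySem.List.pyGetD dp k []) l v)
-- the loop body 'dp[k][l] = dp[k-1][l-1] + 1; max_len = max(max_len, dp[k][l])'
def pvStep (st : List (List Int) × Int) (c : Int × Int) : List (List Int) × Int :=
  let v := pvGet2 st.1 (c.1 - 1) (c.2 - 1) + 1
  (pvSet2 st.1 c.1 c.2 v, max st.2 v)

def largest_common_subsquare (A : List (List Int)) (B : List (List Int)) : Int :=
  let n : Int := A.length
  let m : Int := (PySem.List.pyGetD A 0 []).length
  let x : Int := B.length
  let y : Int := (PySem.List.pyGetD B 0 []).length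
  let dp0 := List.replicate (x + 1).toNat (List.replicate (y + 1).toNat (0 : Int))
  let st := (PySem.List.pyRange 1 (n + 1) 1).foldl (fun st i =>
    (PySem.List.pyRange 1 (m + 1) 1).foldl (fun st j =>
      (PySem.List.pyRange 1 (x + 1) 1).foldl (fun st k =>
        (PySem.List.pyRange 1 (y + 1) 1).foldl (fun st l =>
          if pvGet2 A (i - 1) (j - 1) = pvGet2 B (k - 1) (l - 1) then pvStep st (k, l) else st)
          st) st) st) (dp0, 0)
  st.2

-- ===== PORT B =====
-- the index-building loop of Source B: value -> its 1-based (k,l) positions, row-major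
def pvIndex (Bm : List (List Int)) (x y : Int) : PySem.Dict Int (List (Int × Int)) :=
  (PySem.List.pyRange 1 (x + 1) 1).foldl (fun d k =>
    (PySem.List.pyRange 1 (y + 1) 1).foldl (fun d l =>
      d.modify (pvGet2 Bm (k - 1) (l - 1)) [] (· ++ [(k, l)])) d) PySem.Dict.empty

def largest_common_subsquare_alt (A : List (List Int)) (B : List (List Int)) : Int :=
  let x : Int := B.length
  let y : Int := (PySem.List.pyGetD B 0 []).length
  let index := pvIndex B x y
  let dp0 := List.replicate (x + 1).toNat (List.replicate (y + 1).toNat (0 : Int))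
  let st := (PySem.List.pyRange 1 ((A.length : Int) + 1) 1).foldl (fun st i =>
    (PySem.List.pyRange 1 (((PySem.List.pyGetD A 0 []).length : Int) + 1) 1).foldl (fun st j =>
      (index.getD (pvGet2 A (i - 1) (j - 1)) []).foldl pvStep st) st) (dp0, 0)
  st.2

-- ===== PRECONDITION & SPEC =====
-- Pre_ excludes empty matrices and matrices containing a row shorter than the first row:
-- there Python raises IndexError (except on degenerate corners where one program's loops
-- skip the short row while the other's raise — B's natural index build reads all of B).
def Pre_largest_common_subsquare (A : List (List Int)) (B : List (List Int)) : Prop :=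
  A ≠ [] ∧ B ≠ [] ∧ (∀ r ∈ A, A.headI.length ≤ r.length) ∧ (∀ r ∈ B, B.headI.length ≤ r.length)
instance (A : List (List Int)) (B : List (List Int)) : Decidable (Pre_largest_common_subsquare A B) := by unfold Pre_largest_common_subsquare; infer_instance

def pvWitness_largest_common_subsquare : List (List Int) × List (List Int) :=
  ([[1, 2], [3, 1]], [[3, 1], [0, 1]])

def Spec_largest_common_subsquare (A : List (List Int)) (B : List (List Int)) (out : Int) : Prop := out = largest_common_subsquare_alt A B
instance (A : List (List Int)) (B : List (List Int)) (out : Int) : Decidable (Spec_largest_common_subsquare A B out) := by unfold Spec_largest_common_subsquare; infer_instance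

-- ===== CLAIM (what is proved, stated in full; the proofs are below) =====
def Claim_equal_largest_common_subsquare : Prop := ∀ (A : List (List Int)) (B : List (List Int)), Dom_largest_common_subsquare A B → Pre_largest_common_subsquare A B → Spec_largest_common_subsquare A B (largest_common_subsquare A B)

-- ===== LEMMAS AND PROOFS =====

-- the (k,l) cell grid of B in row-major order
def pvCells (x y : Int) : List (Int × Int) :=
  (PySem.List.pyRange 1 (x + 1) 1).flatMap (fun k =>
    (PySem.List.pyRange 1 (y + 1) 1).map (fun l => (k, l)))

theorem pv_foldl_flatMap {α β σ : Type} (l : List α) (g : α → List β) (f : σ → β → σ)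
    (init : σ) :
    (l.flatMap g).foldl f init = l.foldl (fun acc x => (g x).foldl f acc) init := by
  induction l generalizing init with
  | nil => rfl
  | cons h t ih => simp [List.foldl_append, ih]

theorem pv_foldl_cells {σ : Type} (x y : Int) (f : σ → Int × Int → σ) (init : σ) :
    (PySem.List.pyRange 1 (x + 1) 1).foldl (fun st k =>
      (PySem.List.pyRange 1 (y + 1) 1).foldl (fun st l => f st (k, l)) st) init
    = (pvCells x y).foldl f init := by
  simp [pvCells, pv_foldl_flatMap, List.foldl_map]

theorem pvIndex_getD (Bm : List (List Int)) (x y v : Int) :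
    (pvIndex Bm x y).getD v []
      = (pvCells x y).filter (fun c => pvGet2 Bm (c.1 - 1) (c.2 - 1) == v) := by
  have h1 : pvIndex Bm x y
      = (pvCells x y).foldl
          (fun (d : PySem.Dict Int (List (Int × Int))) (c : Int × Int) =>
            d.modify (pvGet2 Bm (c.1 - 1) (c.2 - 1)) [] (· ++ [c]))
          PySem.Dict.empty :=
    pv_foldl_cells x y
      (fun (d : PySem.Dict Int (List (Int × Int))) (c : Int × Int) =>
        d.modify (pvGet2 Bm (c.1 - 1) (c.2 - 1)) [] (· ++ [c])) _
  rw [h1]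
  have h2 : ((pvCells x y).map (fun c => (pvGet2 Bm (c.1 - 1) (c.2 - 1), c))).foldl
        (fun (d : PySem.Dict Int (List (Int × Int))) p => d.modify p.1 [] (· ++ [p.2]))
        PySem.Dict.empty
      = (pvCells x y).foldl
          (fun (d : PySem.Dict Int (List (Int × Int))) (c : Int × Int) =>
            d.modify (pvGet2 Bm (c.1 - 1) (c.2 - 1)) [] (· ++ [c]))
          PySem.Dict.empty := List.foldl_map
  rw [← h2]
  rw [PySem.Dict.getD_foldl_modify_append]
  simp [List.filter_map, List.map_map, Function.comp_def]

-- A's two inner loops over all of B = B's loop over the indexed matching positions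
theorem pv_inner_eq (Bm : List (List Int)) (x y av : Int) (st : List (List Int) × Int) :
    (PySem.List.pyRange 1 (x + 1) 1).foldl (fun st k =>
      (PySem.List.pyRange 1 (y + 1) 1).foldl (fun st l =>
        if av = pvGet2 Bm (k - 1) (l - 1) then pvStep st (k, l) else st) st) st
    = ((pvIndex Bm x y).getD av []).foldl pvStep st := by
  have h1 : (PySem.List.pyRange 1 (x + 1) 1).foldl (fun st k =>
      (PySem.List.pyRange 1 (y + 1) 1).foldl (fun st l =>
        if av = pvGet2 Bm (k - 1) (l - 1) then pvStep st (k, l) else st) st) st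
      = (pvCells x y).foldl
          (fun st c => if av = pvGet2 Bm (c.1 - 1) (c.2 - 1) then pvStep st c else st) st :=
    pv_foldl_cells x y (fun st c => if av = pvGet2 Bm (c.1 - 1) (c.2 - 1) then pvStep st c else st) _
  rw [h1]
  rw [PySem.List.foldl_ite_eq_foldl_filter]
  rw [pvIndex_getD]
  congr 1
  apply List.filter_congr
  intro c _
  rcases eq_or_ne av (pvGet2 Bm (c.1 - 1) (c.2 - 1)) with h | h
  · simp [h]
  · simp [h, Ne.symm h]

-- ===== VERDICT (by name: the statement is the Claim_ definition above) =====
theorem largest_common_subsquare_spec : Claim_equal_largest_common_subsquare := by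
  intro A B _ _
  unfold Spec_largest_common_subsquare largest_common_subsquare largest_common_subsquare_alt
  dsimp only
  congr 1
  apply PySem.List.foldl_congr_mem
  intro st i _
  apply PySem.List.foldl_congr_mem
  intro st' j _
  exact pv_inner_eq B (B.length : Int) ((PySem.List.pyGetD B 0 []).length : Int)
    (pvGet2 A (i - 1) (j - 1)) st'
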